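-- pv_equiv track=rewrite | github.com/Mylloon/KassouBot | src/utils/core.py | ageLayout
-- ===== SOURCE A (Python) =====
-- def ageLayout(tuple):
--     """avec la méthode 'get_age', permet de mettre en forme un âge⁢⁢⁢⁢⁢⁢⁢⁢⁢⁢"""
--     time = {}
--     time[0], time[1], time[2], time[3], time[4], time[5] = "an", "mois", "jour", "heure", "minute", "seconde"
--     for i in range(len(tuple)):
--         if tuple[i] > 1 and i != 1:
--             time[i] = time[i] + "s"
--     message = ""
--     if tuple[5] > 0: # pour les secondes
--         affichage = [5] # on affiche que : seconde
--     if tuple[4] > 0: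
--         affichage = [4, 5] # on affiche : minute + seconde
--     if tuple[3] > 0:
--         affichage = [3, 4, 5] # on affiche : heure + minute + seconde
--     if tuple[2] > 0:
--         affichage = [2, 3, 4] # on affiche : jour + heure + minute
--     if tuple[1] > 0:
--         affichage = [1, 2, 3] # on affiche : mois + jour + heure
--     if tuple[0] > 0:
--         affichage = [0, 1, 3] # on affiche : an + mois + heure
--     for i in affichage:
--         message = message + f", {tuple[i]} {time[i]}"
--     return message[2:]
-- ===== SOURCE B (Python) =====
-- def ageLayout(tuple):
--     """avec la méthode 'get_age', permet de mettre en forme un âge"""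
--     def fmt(i):
--         names = ("an", "mois", "jour", "heure", "minute", "seconde")
--         return f"{tuple[i]} {names[i]}" + ("s" if tuple[i] > 1 and i != 1 else "")
--     if tuple[0] > 0:
--         # years: an + mois + heure (not a contiguous window), as the source comments
--         return ", ".join(fmt(i) for i in (0, 1, 3))
--     window, answer = [], None
--     for i in range(5, 0, -1):
--         window = [fmt(i)] + window[:2]
--         if tuple[i] > 0:
--             answer = window
--     return ", ".join(answer)
-- ===== Notes on version B (the rewrite author's own statement) =====
-- stated objective: alternative
-- what changed: B replaces A's name-dict mutation, overwriting six-branch if-cascade over index lists and message[2:] slice by an explicit early return for the years case plus a backward fold (seconds down to months) that maintains a sliding window of the last three formatted parts and captures it at each positive unit, joining the captured window with ', '.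
import Mathlib
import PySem

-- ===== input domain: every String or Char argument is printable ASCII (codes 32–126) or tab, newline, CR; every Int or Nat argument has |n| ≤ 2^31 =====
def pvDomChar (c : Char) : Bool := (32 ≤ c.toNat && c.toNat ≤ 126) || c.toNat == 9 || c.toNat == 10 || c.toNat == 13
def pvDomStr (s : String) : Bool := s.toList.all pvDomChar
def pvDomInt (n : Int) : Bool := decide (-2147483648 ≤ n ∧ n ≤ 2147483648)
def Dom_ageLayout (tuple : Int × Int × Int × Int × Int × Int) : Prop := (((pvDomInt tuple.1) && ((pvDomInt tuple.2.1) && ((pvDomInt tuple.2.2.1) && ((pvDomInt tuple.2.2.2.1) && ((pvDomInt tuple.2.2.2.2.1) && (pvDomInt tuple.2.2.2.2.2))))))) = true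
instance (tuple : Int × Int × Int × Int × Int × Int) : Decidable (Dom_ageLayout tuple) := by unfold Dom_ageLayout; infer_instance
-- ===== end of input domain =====

-- B replaces A's name-dict mutation, overwriting if-cascade and message[2:] slice by an explicit
-- years early-return plus a backward sliding-window fold joined with ", " (objective: alternative).

-- tuple[i] for an index i in 0..5 (ported by hand: Python tuple indexing on a 6-tuple; exact for i ∈ [0,5])
def tupGet (t : Int × Int × Int × Int × Int × Int) (i : Int) : Int :=
  if i = 0 then t.1 else if i = 1 then t.2.1 else if i = 2 then t.2.2.1
  else if i = 3 then t.2.2.2.1 else if i = 4 then t.2.2.2.2.1 else t.2.2.2.2.2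

-- ===== PORT A =====
def ageLayout (tuple : Int × Int × Int × Int × Int × Int) : String :=
  let time : PySem.Dict Int String :=
    ((((((PySem.Dict.empty).insert 0 "an").insert 1 "mois").insert 2 "jour").insert 3
      "heure").insert 4 "minute").insert 5 "seconde"
  let time := (PySem.List.pyRange 0 6 1).foldl
    (fun d i => if tupGet tuple i > 1 ∧ i ≠ 1 then d.modify i "" (fun s => s ++ "s") else d) time
  let message : String := ""
  -- the if-cascade: each true test overwrites affichage; none true = Python NameError (none here)
  let affichage : Option (List Int) :=
    (if tuple.2.2.2.2.2 > 0 then some [5] else none) |> (fun a =>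
    (if tuple.2.2.2.2.1 > 0 then some [4, 5] else a)) |> (fun a =>
    (if tuple.2.2.2.1 > 0 then some [3, 4, 5] else a)) |> (fun a =>
    (if tuple.2.2.1 > 0 then some [2, 3, 4] else a)) |> (fun a =>
    (if tuple.2.1 > 0 then some [1, 2, 3] else a)) |> (fun a =>
    (if tuple.1 > 0 then some [0, 1, 3] else a))
  match affichage with
  | none => ""  -- Python raises NameError here; excluded by Pre_ageLayout
  | some aff =>
    let message := aff.foldl
      (fun m i => m ++ ", " ++ PySem.Int.toStr (tupGet tuple i) ++ " " ++ time.getD i "") message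
    PySem.Str.slice message (some 2) none

-- ===== PORT B =====
def fmtB (t : Int × Int × Int × Int × Int × Int) (i : Int) : String :=
  PySem.Int.toStr (tupGet t i) ++ " " ++
    PySem.List.pyGetD ["an", "mois", "jour", "heure", "minute", "seconde"] i "" ++
    (if tupGet t i > 1 ∧ i ≠ 1 then "s" else "")

def ageLayout_alt (tuple : Int × Int × Int × Int × Int × Int) : String :=
  if tuple.1 > 0 then
    -- years: an + mois + heure, as the source comments
    PySem.Str.join ", " (([0, 1, 3] : List Int).map (fmtB tuple))
  else
    let st := (PySem.List.pyRange 5 0 (-1)).foldl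
      (fun (p : List String × Option (List String)) i =>
        let window := fmtB tuple i :: p.1.take 2
        (window, if tupGet tuple i > 0 then some window else p.2)) ([], none)
    match st.2 with
    | none => ""  -- Python raises TypeError here; excluded by Pre_ageLayout
    | some ans => PySem.Str.join ", " ans

-- ===== PRECONDITION & SPEC =====
-- Pre_ excludes exactly the tuples with no positive component, on which A raises NameError
-- (affichage is never assigned) and B raises TypeError (answer stays None).
def Pre_ageLayout (tuple : Int × Int × Int × Int × Int × Int) : Prop :=
  tuple.1 > 0 ∨ tuple.2.1 > 0 ∨ tuple.2.2.1 > 0 ∨ tuple.2.2.2.1 > 0 ∨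
    tuple.2.2.2.2.1 > 0 ∨ tuple.2.2.2.2.2 > 0
instance (tuple : Int × Int × Int × Int × Int × Int) : Decidable (Pre_ageLayout tuple) := by
  unfold Pre_ageLayout; infer_instance
def pvWitness_ageLayout : (Int × Int × Int × Int × Int × Int) := (1, 2, 0, 3, 0, 5)

def Spec_ageLayout (tuple : Int × Int × Int × Int × Int × Int) (out : String) : Prop := out = ageLayout_alt tuple
instance (tuple : Int × Int × Int × Int × Int × Int) (out : String) : Decidable (Spec_ageLayout tuple out) := by unfold Spec_ageLayout; infer_instance

-- ===== CLAIM (what is proved, stated in full; the proofs are below) =====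
def Claim_equal_ageLayout : Prop := ∀ (tuple : Int × Int × Int × Int × Int × Int), Dom_ageLayout tuple → Pre_ageLayout tuple → Spec_ageLayout tuple (ageLayout tuple)

-- ===== LEMMAS AND PROOFS =====
theorem pyRange06 : PySem.List.pyRange 0 6 1 = [0, 1, 2, 3, 4, 5] := by decide
theorem pyRange50 : PySem.List.pyRange 5 0 (-1) = [5, 4, 3, 2, 1] := by decide

-- A's `time` dict as a function of the six fields (definitionally the port's fold)
def timeDict (a b c d e f : Int) : PySem.Dict Int String :=
  (PySem.List.pyRange 0 6 1).foldl
    (fun dd i => if tupGet (a, b, c, d, e, f) i > 1 ∧ i ≠ 1 then dd.modify i "" (fun s => s ++ "s") else dd)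
    (((((((PySem.Dict.empty).insert 0 "an").insert 1 "mois").insert 2 "jour").insert 3
      "heure").insert 4 "minute").insert 5 "seconde")

theorem timeDict_getD0 (a b c d e f : Int) :
    (timeDict a b c d e f).getD 0 "" = "an" ++ (if a > 1 then "s" else "") := by
  simp only [timeDict, pyRange06, tupGet, List.foldl]
  norm_num
  split_ifs <;> decide
theorem timeDict_getD1 (a b c d e f : Int) :
    (timeDict a b c d e f).getD 1 "" = "mois" := by
  simp only [timeDict, pyRange06, tupGet, List.foldl]
  norm_num
  split_ifs <;> decide
theorem timeDict_getD2 (a b c d e f : Int) :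
    (timeDict a b c d e f).getD 2 "" = "jour" ++ (if c > 1 then "s" else "") := by
  simp only [timeDict, pyRange06, tupGet, List.foldl]
  norm_num
  split_ifs <;> decide
theorem timeDict_getD3 (a b c d e f : Int) :
    (timeDict a b c d e f).getD 3 "" = "heure" ++ (if d > 1 then "s" else "") := by
  simp only [timeDict, pyRange06, tupGet, List.foldl]
  norm_num
  split_ifs <;> decide
theorem timeDict_getD4 (a b c d e f : Int) :
    (timeDict a b c d e f).getD 4 "" = "minute" ++ (if e > 1 then "s" else "") := by
  simp only [timeDict, pyRange06, tupGet, List.foldl]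
  norm_num
  split_ifs <;> decide
theorem timeDict_getD5 (a b c d e f : Int) :
    (timeDict a b c d e f).getD 5 "" = "seconde" ++ (if f > 1 then "s" else "") := by
  simp only [timeDict, pyRange06, tupGet, List.foldl]
  norm_num
  split_ifs <;> decide

theorem comma_toList : (", " : String).toList = [',', ' '] := by decide

-- A's 2-chars slice of the fold-built message versus B's join, for 3, 2 and 1 parts
theorem slice_join3 (x1 y1 x2 y2 x3 y3 : String) :
    PySem.Str.slice ((", " : String) ++ x1 ++ " " ++ y1 ++ ", " ++ x2 ++ " " ++ y2 ++ ", " ++ x3 ++ " " ++ y3) (some 2) none =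
      PySem.Str.join ", " [x1 ++ " " ++ y1, x2 ++ " " ++ y2, x3 ++ " " ++ y3] := by
  rw [← String.toList_inj]
  rw [PySem.Str.toList_slice, PySem.Chars.slice, PySem.List.slice_from _ (by norm_num)]
  simp [PySem.Str.join, PySem.Chars.join_cons_cons, PySem.Chars.join_singleton, comma_toList]
theorem slice_join2 (x1 y1 x2 y2 : String) :
    PySem.Str.slice ((", " : String) ++ x1 ++ " " ++ y1 ++ ", " ++ x2 ++ " " ++ y2) (some 2) none =
      PySem.Str.join ", " [x1 ++ " " ++ y1, x2 ++ " " ++ y2] := by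
  rw [← String.toList_inj]
  rw [PySem.Str.toList_slice, PySem.Chars.slice, PySem.List.slice_from _ (by norm_num)]
  simp [PySem.Str.join, PySem.Chars.join_cons_cons, PySem.Chars.join_singleton, comma_toList]
theorem slice_join1 (x1 y1 : String) :
    PySem.Str.slice ((", " : String) ++ x1 ++ " " ++ y1) (some 2) none =
      PySem.Str.join ", " [x1 ++ " " ++ y1] := by
  rw [← String.toList_inj]
  rw [PySem.Str.toList_slice, PySem.Chars.slice, PySem.List.slice_from _ (by norm_num)]
  simp [PySem.Str.join, PySem.Chars.join_singleton, comma_toList]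

theorem foldl_eq_timeDict (a b c d e f : Int) :
    (PySem.List.pyRange 0 6 1).foldl
      (fun dd i => if tupGet (a, b, c, d, e, f) i > 1 ∧ i ≠ 1 then dd.modify i "" (fun s => s ++ "s") else dd)
      (((((((PySem.Dict.empty).insert 0 "an").insert 1 "mois").insert 2 "jour").insert 3
        "heure").insert 4 "minute").insert 5 "seconde") = timeDict a b c d e f := rfl

theorem name1 : PySem.List.pyGetD (["an", "mois", "jour", "heure", "minute", "seconde"] : List String) 1 "" = "mois" := by decide
theorem name2 : PySem.List.pyGetD (["an", "mois", "jour", "heure", "minute", "seconde"] : List String) 2 "" = "jour" := by decide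
theorem name3 : PySem.List.pyGetD (["an", "mois", "jour", "heure", "minute", "seconde"] : List String) 3 "" = "heure" := by decide
theorem name4 : PySem.List.pyGetD (["an", "mois", "jour", "heure", "minute", "seconde"] : List String) 4 "" = "minute" := by decide
theorem name5 : PySem.List.pyGetD (["an", "mois", "jour", "heure", "minute", "seconde"] : List String) 5 "" = "seconde" := by decide

-- fmtB at each literal index
theorem fmtB0 (a b c d e f : Int) :
    fmtB (a, b, c, d, e, f) 0 = PySem.Int.toStr a ++ " " ++ "an" ++ (if a > 1 then "s" else "") := by
  simp [fmtB, tupGet]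
theorem fmtB1 (a b c d e f : Int) :
    fmtB (a, b, c, d, e, f) 1 = PySem.Int.toStr b ++ " " ++ "mois" := by
  simp [fmtB, tupGet, name1]
theorem fmtB2 (a b c d e f : Int) :
    fmtB (a, b, c, d, e, f) 2 = PySem.Int.toStr c ++ " " ++ "jour" ++ (if c > 1 then "s" else "") := by
  simp [fmtB, tupGet, name2]
theorem fmtB3 (a b c d e f : Int) :
    fmtB (a, b, c, d, e, f) 3 = PySem.Int.toStr d ++ " " ++ "heure" ++ (if d > 1 then "s" else "") := by
  simp [fmtB, tupGet, name3]
theorem fmtB4 (a b c d e f : Int) :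
    fmtB (a, b, c, d, e, f) 4 = PySem.Int.toStr e ++ " " ++ "minute" ++ (if e > 1 then "s" else "") := by
  simp [fmtB, tupGet, name4]
theorem fmtB5 (a b c d e f : Int) :
    fmtB (a, b, c, d, e, f) 5 = PySem.Int.toStr f ++ " " ++ "seconde" ++ (if f > 1 then "s" else "") := by
  simp [fmtB, tupGet, name5]

theorem case0 (a b c d e f : Int) (ha : a > 0) :
    ageLayout (a, b, c, d, e, f) = ageLayout_alt (a, b, c, d, e, f) := by
  simp only [ageLayout, ageLayout_alt, foldl_eq_timeDict]
  simp only [tupGet]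
  norm_num [ha, timeDict_getD0, timeDict_getD1, timeDict_getD3, fmtB0, fmtB1, fmtB3]
  rw [slice_join3]
  split_ifs <;> simp [String.append_assoc]
theorem case1 (a b c d e f : Int) (ha : ¬ a > 0) (hb : b > 0) :
    ageLayout (a, b, c, d, e, f) = ageLayout_alt (a, b, c, d, e, f) := by
  simp only [ageLayout, ageLayout_alt, foldl_eq_timeDict]
  simp only [pyRange50, List.foldl, List.take, tupGet]
  norm_num [ha, hb, timeDict_getD1, timeDict_getD2, timeDict_getD3, fmtB1, fmtB2, fmtB3]
  rw [slice_join3]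
  split_ifs <;> simp [String.append_assoc]
theorem case2 (a b c d e f : Int) (ha : ¬ a > 0) (hb : ¬ b > 0) (hc : c > 0) :
    ageLayout (a, b, c, d, e, f) = ageLayout_alt (a, b, c, d, e, f) := by
  simp only [ageLayout, ageLayout_alt, foldl_eq_timeDict]
  simp only [pyRange50, List.foldl, List.take, tupGet]
  norm_num [ha, hb, hc, timeDict_getD2, timeDict_getD3, timeDict_getD4, fmtB2, fmtB3, fmtB4]
  rw [slice_join3]
  split_ifs <;> simp [String.append_assoc]
theorem case3 (a b c d e f : Int) (ha : ¬ a > 0) (hb : ¬ b > 0) (hc : ¬ c > 0) (hd : d > 0) :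
    ageLayout (a, b, c, d, e, f) = ageLayout_alt (a, b, c, d, e, f) := by
  simp only [ageLayout, ageLayout_alt, foldl_eq_timeDict]
  simp only [pyRange50, List.foldl, List.take, tupGet]
  norm_num [ha, hb, hc, hd, timeDict_getD3, timeDict_getD4, timeDict_getD5, fmtB3, fmtB4, fmtB5]
  rw [slice_join3]
  split_ifs <;> simp [String.append_assoc]
theorem case4 (a b c d e f : Int) (ha : ¬ a > 0) (hb : ¬ b > 0) (hc : ¬ c > 0) (hd : ¬ d > 0)
    (he : e > 0) : ageLayout (a, b, c, d, e, f) = ageLayout_alt (a, b, c, d, e, f) := by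
  simp only [ageLayout, ageLayout_alt, foldl_eq_timeDict]
  simp only [pyRange50, List.foldl, List.take, tupGet]
  norm_num [ha, hb, hc, hd, he, timeDict_getD4, timeDict_getD5, fmtB4, fmtB5]
  rw [slice_join2]
  split_ifs <;> simp [String.append_assoc]
theorem case5 (a b c d e f : Int) (ha : ¬ a > 0) (hb : ¬ b > 0) (hc : ¬ c > 0) (hd : ¬ d > 0)
    (he : ¬ e > 0) (hf : f > 0) : ageLayout (a, b, c, d, e, f) = ageLayout_alt (a, b, c, d, e, f) := by
  simp only [ageLayout, ageLayout_alt, foldl_eq_timeDict]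
  simp only [pyRange50, List.foldl, List.take, tupGet]
  norm_num [ha, hb, hc, hd, he, hf, timeDict_getD5, fmtB5]
  rw [slice_join1]
  split_ifs <;> simp [String.append_assoc]

-- ===== VERDICT (by name: the statement is the Claim_ definition above) =====
theorem ageLayout_spec : Claim_equal_ageLayout := by
  intro t _ hpre
  obtain ⟨a, b, c, d, e, f⟩ := t
  show ageLayout (a, b, c, d, e, f) = ageLayout_alt (a, b, c, d, e, f)
  by_cases ha : a > 0
  · exact case0 a b c d e f ha
  by_cases hb : b > 0
  · exact case1 a b c d e f ha hb
  by_cases hc : c > 0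
  · exact case2 a b c d e f ha hb hc
  by_cases hd : d > 0
  · exact case3 a b c d e f ha hb hc hd
  by_cases he : e > 0
  · exact case4 a b c d e f ha hb hc hd he
  by_cases hf : f > 0
  · exact case5 a b c d e f ha hb hc hd he hf
  · rcases hpre with h | h | h | h | h | h <;> simp_all
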